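-- pv_equiv track=rewrite | github.com/AiZhanghan/Leetcode | 秋招/腾讯/5.py | func
-- ===== SOURCE A (Python) =====
-- def func(nums, colors):
--     """
--     Args:
--         nums: list[int]
--         colors: list[str]
--
--     Return:
--         int
--     """
--     red = []
--     black = []
--     for i in range(len(nums)):
--         if colors[i] == "B":
--             black.append((nums[i], i))
--         else:
--             red.append((nums[i], i))
--
--     reverse_count = 0
--     max_distance = -1
--     for i in range(len(red)):
--         for j in range(i):
--             if red[i][0] < red[j][0]:
--                 reverse_count += 1
--                 max_distance = max(max_distance, red[i][1] - red[j][1])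
--
--     for i in range(len(black)):
--         for j in range(i):
--             if black[i][0] < black[j][0]:
--                 reverse_count += 1
--                 max_distance = max(max_distance, black[i][1] - black[j][1])
--
--     return reverse_count + max_distance - 1
-- ===== SOURCE B (Python) =====
-- def func(nums, colors):
--     # Partition into (value, original index) pairs per color group.
--     red, black = [], []
--     for i, (v, c) in enumerate(zip(nums, colors)):
--         if c == "B":
--             black.append((v, i))
--         else:
--             red.append((v, i))
--
--     def annotate(sa):
--         # triples (value, index, min index over this suffix), built right-to-left
--         ann = []
--         suf = None
--         for v, idx in reversed(sa):
--             suf = idx if suf is None else min(idx, suf)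
--             ann.append((v, idx, suf))
--         ann.reverse()
--         return ann
--
--     def merge(aa, sb):
--         # aa: annotated sorted-left, sb: sorted-right.
--         # Returns (merged pairs, cross inversions, best cross distance or None).
--         merged, cc, mc = [], 0, None
--         i, j = 0, 0
--         while i < len(aa) and j < len(sb):
--             y = sb[j]
--             if y[0] < aa[i][0]:
--                 cc += len(aa) - i
--                 d = y[1] - aa[i][2]
--                 mc = d if mc is None else max(d, mc)
--                 merged.append(y)
--                 j += 1
--             else:
--                 merged.append((aa[i][0], aa[i][1]))
--                 i += 1
--         merged.extend((v, idx) for v, idx, _ in aa[i:])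
--         merged.extend(sb[j:])
--         return merged, cc, mc
--
--     def sort_count(l):
--         # merge sort by value; returns (sorted, inversions, best inverted-pair
--         # index distance or None)
--         if len(l) <= 1:
--             return l, 0, None
--         m = len(l) // 2
--         sa, ca, ma = sort_count(l[:m])
--         sb, cb, mb = sort_count(l[m:])
--         s, cc, mc = merge(annotate(sa), sb)
--         cands = [x for x in (ma, mb, mc) if x is not None]
--         return s, ca + cb + cc, (max(cands) if cands else None)
--
--     _, cr, mr = sort_count(red)
--     _, cb_, mb_ = sort_count(black)
--     cands = [x for x in (mr, mb_) if x is not None]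
--     md = max(cands) if cands else -1
--     return cr + cb_ + md - 1
-- ===== Notes on version B (the rewrite author's own statement) =====
-- stated objective: faster
-- what changed: Replaces A's O(n^2) nested index scans per color group by one merge sort per group that counts inversions and tracks the maximum inverted-pair index distance via suffix-minimum index annotations of the sorted left half.
import Mathlib
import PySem

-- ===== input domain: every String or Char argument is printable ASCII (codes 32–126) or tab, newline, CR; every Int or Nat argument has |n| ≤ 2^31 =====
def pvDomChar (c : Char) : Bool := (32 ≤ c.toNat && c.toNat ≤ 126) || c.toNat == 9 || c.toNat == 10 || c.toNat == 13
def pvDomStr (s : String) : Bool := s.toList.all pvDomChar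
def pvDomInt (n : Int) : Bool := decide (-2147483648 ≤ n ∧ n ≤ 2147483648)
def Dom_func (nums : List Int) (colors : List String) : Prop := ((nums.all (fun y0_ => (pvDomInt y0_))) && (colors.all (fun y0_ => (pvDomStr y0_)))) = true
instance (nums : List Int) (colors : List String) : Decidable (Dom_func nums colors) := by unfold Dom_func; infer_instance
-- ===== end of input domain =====

-- B replaces A's quadratic per-color pair scan by one merge sort per color that counts
-- inversions and tracks the best inverted-pair index distance via suffix-minimum indices.

-- ===== PORT A =====
-- first loop of A: partition into red/black lists of (value, original index)
def funcBuild (nums : List Int) (colors : List String) :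
    List (Int × Int) × List (Int × Int) :=
  (PySem.List.pyRange 0 (nums.length : Int) 1).foldl
    (fun (s : List (Int × Int) × List (Int × Int)) i =>
      if PySem.List.pyGetD colors i "" == "B" then
        (s.1, s.2 ++ [(PySem.List.pyGetD nums i 0, i)])
      else
        (s.1 ++ [(PySem.List.pyGetD nums i 0, i)], s.2))
    ([], [])

-- one of A's nested index loops, threading (reverse_count, max_distance)
def funcPairLoop (l : List (Int × Int)) (st : Int × Int) : Int × Int :=
  (PySem.List.pyRange 0 (l.length : Int) 1).foldl
    (fun st i =>
      (PySem.List.pyRange 0 i 1).foldl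
        (fun st j =>
          let pi := PySem.List.pyGetD l i (0, 0)
          let pj := PySem.List.pyGetD l j (0, 0)
          if pi.1 < pj.1 then (st.1 + 1, max st.2 (pi.2 - pj.2)) else st)
        st)
    st

def func (nums : List Int) (colors : List String) : Int :=
  let rb := funcBuild nums colors
  let st := funcPairLoop rb.1 (0, -1)
  let st2 := funcPairLoop rb.2 st
  st2.1 + st2.2 - 1

-- ===== PORT B =====
-- combine two optional maxima (Python: max over the non-None candidates, else None)
def ocmb : Option Int → Option Int → Option Int
  | none, b => b
  | some a, none => some a
  | some a, some b => some (max a b)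

-- B's partition loop (enumerate over zip)
def altBuild (nums : List Int) (colors : List String) :
    List (Int × Int) × List (Int × Int) :=
  (PySem.List.enumerate (nums.zip colors) 0).foldl
    (fun (s : List (Int × Int) × List (Int × Int)) e =>
      if e.2.2 == "B" then (s.1, s.2 ++ [(e.2.1, e.1)])
      else (s.1 ++ [(e.2.1, e.1)], s.2))
    ([], [])

-- B's annotate: (value, index, min index over this suffix), built right-to-left
def altAnnotate (sa : List (Int × Int)) : List (Int × Int × Int) :=
  sa.reverse.foldl
    (fun (acc : List (Int × Int × Int)) p =>
      (p.1, p.2,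
        match acc with
        | [] => p.2
        | q :: _ => min p.2 q.2.2) :: acc)
    []

-- B's merge: annotated sorted left + sorted right → (merged, cross inversions, best cross distance)
def altMerge : List (Int × Int × Int) → List (Int × Int) → List (Int × Int) × Int × Option Int
  | [], sb => (sb, 0, none)
  | aa, [] => (aa.map (fun t => (t.1, t.2.1)), 0, none)
  | a :: aa', y :: sb' =>
    if y.1 < a.1 then
      let r := altMerge (a :: aa') sb'
      (y :: r.1, r.2.1 + (1 + (aa'.length : Int) ),
        some (match r.2.2 with
          | none => y.2 - a.2.2
          | some m => max (y.2 - a.2.2) m))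
    else
      let r := altMerge aa' (y :: sb')
      ((a.1, a.2.1) :: r.1, r.2.1, r.2.2)
  termination_by aa sb => aa.length + sb.length

-- B's merge sort counting inversions and the best inverted-pair index distance
def altSort (l : List (Int × Int)) : List (Int × Int) × Int × Option Int :=
  if l.length ≤ 1 then (l, 0, none)
  else
    let m := l.length / 2
    let ra := altSort (l.take m)
    let rb := altSort (l.drop m)
    let rc := altMerge (altAnnotate ra.1) rb.1
    (rc.1, ra.2.1 + rb.2.1 + rc.2.1, ocmb ra.2.2 (ocmb rb.2.2 rc.2.2))
  termination_by l.length
  decreasing_by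
  · simp [List.length_take]; omega
  · simp [List.length_drop]; omega

def func_alt (nums : List Int) (colors : List String) : Int :=
  let rb := altBuild nums colors
  let r := altSort rb.1
  let b := altSort rb.2
  let md := match ocmb r.2.2 b.2.2 with
    | none => -1
    | some v => v
  r.2.1 + b.2.1 + md - 1

-- ===== PRECONDITION & SPEC =====
-- Pre_ excludes only the inputs where A raises IndexError (colors shorter than nums).
def Pre_func (nums : List Int) (colors : List String) : Prop :=
  nums.length ≤ colors.length
instance (nums : List Int) (colors : List String) : Decidable (Pre_func nums colors) := by
  unfold Pre_func; infer_instance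

def pvWitness_func : List Int × List String := ([2, 1, 3], ["R", "B", "R"])

def Spec_func (nums : List Int) (colors : List String) (out : Int) : Prop := out = func_alt nums colors
instance (nums : List Int) (colors : List String) (out : Int) : Decidable (Spec_func nums colors out) := by unfold Spec_func; infer_instance

-- ===== CLAIM (what is proved, stated in full; the proofs are below) =====
def Claim_equal_func : Prop := ∀ (nums : List Int) (colors : List String), Dom_func nums colors → Pre_func nums colors → Spec_func nums colors (func nums colors)

-- ===== LEMMAS AND PROOFS =====

-- ---- spec-side combinators (naive pair specifications both ports are reduced to) ----
def cntS : List (Int × Int) → Int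
  | [] => 0
  | x :: xs => (xs.countP (fun y => decide (y.1 < x.1)) : Int) + cntS xs

-- best distance over inverted pairs whose EARLIER element is x
def bwS (x : Int × Int) : List (Int × Int) → Option Int
  | [] => none
  | y :: ys => ocmb (if y.1 < x.1 then some (y.2 - x.2) else none) (bwS x ys)

-- best distance over inverted pairs whose LATER element is x
def bwS' (x : Int × Int) : List (Int × Int) → Option Int
  | [] => none
  | y :: ys => ocmb (if x.1 < y.1 then some (x.2 - y.2) else none) (bwS' x ys)

def bestS : List (Int × Int) → Option Int
  | [] => none
  | x :: xs => ocmb (bwS x xs) (bestS xs)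

def crossC (a b : List (Int × Int)) : Int :=
  (a.map (fun x => ((b.countP (fun y => decide (y.1 < x.1))) : Int))).sum

def crossB : List (Int × Int) → List (Int × Int) → Option Int
  | [], _ => none
  | x :: a, b => ocmb (bwS x b) (crossB a b)

def mthread (m : Int) : Option Int → Int
  | none => m
  | some b => max m b

def sortedLE (l : List (Int × Int)) : Prop := l.Pairwise (fun p q => p.1 ≤ q.1)

-- ---- ocmb algebra ----
theorem ocmb_none_right (a : Option Int) : ocmb a none = a := by cases a <;> rfl
theorem ocmb_none_left (a : Option Int) : ocmb none a = a := rfl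
theorem ocmb_comm (a b : Option Int) : ocmb a b = ocmb b a := by
  cases a <;> cases b <;> simp [ocmb, max_comm]
theorem ocmb_assoc (a b c : Option Int) : ocmb (ocmb a b) c = ocmb a (ocmb b c) := by
  cases a <;> cases b <;> cases c <;> simp [ocmb, max_assoc]
theorem ocmb_left_comm (a b c : Option Int) : ocmb a (ocmb b c) = ocmb b (ocmb a c) := by
  rw [← ocmb_assoc, ocmb_comm a b, ocmb_assoc]

theorem mthread_ocmb (m : Int) (a b : Option Int) :
    mthread m (ocmb a b) = mthread (mthread m a) b := by
  cases a <;> cases b <;> simp [mthread, ocmb, max_assoc]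


-- ---- partition characterization ----
def projE (e : Int × Int × String) : Int × Int := (e.2.1, e.1)

theorem buildFold (L : List (Int × Int × String)) (r b : List (Int × Int)) :
    L.foldl
      (fun (s : List (Int × Int) × List (Int × Int)) e =>
        if e.2.2 == "B" then (s.1, s.2 ++ [(e.2.1, e.1)])
        else (s.1 ++ [(e.2.1, e.1)], s.2)) (r, b)
    = (r ++ (L.filter (fun e => !(e.2.2 == "B"))).map projE,
       b ++ (L.filter (fun e => e.2.2 == "B")).map projE) := by
  induction L generalizing r b with
  | nil => simp
  | cons e L ih =>
    simp only [List.foldl_cons]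
    by_cases h : e.2.2 == "B"
    · rw [if_pos h, ih]; simp [h, projE]
    · rw [if_neg h, ih]; simp [h, projE]

theorem altBuild_eq (nums : List Int) (colors : List String) :
    altBuild nums colors =
      (((PySem.List.enumerate (nums.zip colors) 0).filter (fun e => !(e.2.2 == "B"))).map projE,
       ((PySem.List.enumerate (nums.zip colors) 0).filter (fun e => e.2.2 == "B")).map projE) := by
  unfold altBuild
  simpa using buildFold (PySem.List.enumerate (nums.zip colors) 0) [] []

theorem funcBuild_eq (nums : List Int) (colors : List String)
    (hpre : nums.length ≤ colors.length) :
    funcBuild nums colors = altBuild nums colors := by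
  have hz : (nums.zip colors).length = nums.length := by
    rw [List.length_zip]; omega
  unfold funcBuild altBuild
  rw [PySem.List.enumerate_eq_map_pyRange (d := ((0 : Int), "")), List.foldl_map]
  have hlen : ((nums.zip colors).length : Int) = (nums.length : Int) := by omega
  simp only [PySem.List.len_eq, hlen]
  apply PySem.List.foldl_congr_mem
  intro acc j hj
  obtain ⟨h0, h1⟩ := (PySem.List.mem_pyRange_one).1 hj
  have hjn : j.toNat < nums.length := by omega
  have hjc : j.toNat < colors.length := by omega
  have hjz : j.toNat < (nums.zip colors).length := by omega
  rw [PySem.List.pyGetD_eq_getElem (h0 := h0) (h1 := by push_cast; omega),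
    PySem.List.pyGetD_eq_getElem (h0 := h0) (h1 := by push_cast; omega),
    PySem.List.pyGetD_eq_getElem (h0 := h0) (h1 := by push_cast; omega)]
  simp [List.getElem_zip]

theorem build_pairwise (nums : List Int) (colors : List String) (p : Int × Int × String → Bool) :
    (((PySem.List.enumerate (nums.zip colors) 0).filter p).map projE).Pairwise
      (fun u v => u.2 < v.2) := by
  have h1 : ((PySem.List.enumerate (nums.zip colors) 0).filter p).Pairwise
      (fun a b => a.1 < b.1) :=
    (PySem.List.pairwise_lt_enumerate _ _).filter p
  rw [List.pairwise_map]
  exact h1.imp (fun h => h)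


-- ---- A's nested loops reduced to cntS/bestS ----
theorem mthread_some (m d : Int) : mthread m (some d) = max m d := rfl

theorem innerElems (x : Int × Int) (l : List (Int × Int)) (st : Int × Int) :
    l.foldl (fun st y => if x.1 < y.1 then (st.1 + 1, max st.2 (x.2 - y.2)) else st) st
    = (st.1 + (l.countP (fun y => decide (x.1 < y.1)) : Int), mthread st.2 (bwS' x l)) := by
  induction l generalizing st with
  | nil => simp [bwS', mthread]
  | cons y l ih =>
    simp only [List.foldl_cons, List.countP_cons, bwS']
    by_cases h : x.1 < y.1 <;>
      simp [h, ih, mthread_ocmb, mthread_some, ocmb_none_left, Prod.ext_iff] <;>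
      push_cast <;> omega

theorem pyGetD_append_left (L : List (Int × Int)) (x : Int × Int) (k : Int) (d : Int × Int)
    (h0 : 0 ≤ k) (h1 : k < (L.length : Int)) :
    PySem.List.pyGetD (L ++ [x]) k d = PySem.List.pyGetD L k d := by
  rw [PySem.List.pyGetD_eq_getElem (h0 := h0) (h1 := by simp; omega),
    PySem.List.pyGetD_eq_getElem (h0 := h0) (h1 := h1)]
  exact List.getElem_append_left (by omega)

theorem innerIdx (L : List (Int × Int)) (x : Int × Int) (st : Int × Int) :
    (PySem.List.pyRange 0 (L.length : Int) 1).foldl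
      (fun st j =>
        let pi := PySem.List.pyGetD (L ++ [x]) (L.length : Int) (0, 0)
        let pj := PySem.List.pyGetD (L ++ [x]) j (0, 0)
        if pi.1 < pj.1 then (st.1 + 1, max st.2 (pi.2 - pj.2)) else st)
      st
    = (st.1 + (L.countP (fun y => decide (x.1 < y.1)) : Int), mthread st.2 (bwS' x L)) := by
  have hx : PySem.List.pyGetD (L ++ [x]) (L.length : Int) (0, 0) = x := by
    rw [PySem.List.pyGetD_eq_getElem (h0 := by positivity) (h1 := by simp)]
    simp
  rw [PySem.List.foldl_congr_mem
    (g := fun st j => if x.1 < (PySem.List.pyGetD L j (0, 0)).1 then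
      (st.1 + 1, max st.2 (x.2 - (PySem.List.pyGetD L j (0, 0)).2)) else st)]
  · rw [PySem.List.foldl_pyRange_zero_pyGetD' L (0, 0)
      (fun st y => if x.1 < y.1 then (st.1 + 1, max st.2 (x.2 - y.2)) else st) st]
    exact innerElems x L st
  · intro acc j hj
    obtain ⟨h0, h1⟩ := (PySem.List.mem_pyRange_one).1 hj
    simp only [hx, pyGetD_append_left L x j (0, 0) h0 h1]

theorem cntS_snoc (L : List (Int × Int)) (x : Int × Int) :
    cntS (L ++ [x]) = cntS L + (L.countP (fun y => decide (x.1 < y.1)) : Int) := by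
  induction L with
  | nil => simp [cntS]
  | cons z L ih =>
    simp only [List.cons_append, cntS, List.countP_append, List.countP_cons, ih,
      List.countP_nil]
    by_cases h : x.1 < z.1 <;> by_cases h' : z.1 < x.1 <;> simp [h, h'] <;> push_cast <;> omega

theorem bwS_snoc (z : Int × Int) (L : List (Int × Int)) (x : Int × Int) :
    bwS z (L ++ [x]) = ocmb (bwS z L) (if x.1 < z.1 then some (x.2 - z.2) else none) := by
  induction L with
  | nil => simp [bwS, ocmb_none_right, ocmb_none_left]
  | cons y L ih => simp only [List.cons_append, bwS, ih, ocmb_assoc]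

theorem bestS_snoc (L : List (Int × Int)) (x : Int × Int) :
    bestS (L ++ [x]) = ocmb (bestS L) (bwS' x L) := by
  induction L with
  | nil => simp [bestS, bwS, bwS', ocmb_none_right]
  | cons z L ih =>
    simp only [List.cons_append, bestS, bwS', ih, bwS_snoc]
    simp only [ocmb_assoc, ocmb_left_comm, ocmb_comm]

theorem pairLoop_spec (l : List (Int × Int)) (st : Int × Int) :
    funcPairLoop l st = (st.1 + cntS l, mthread st.2 (bestS l)) := by
  induction l using List.reverseRecOn generalizing st with
  | nil => simp [funcPairLoop, PySem.List.pyRange_one_eq_nil, cntS, bestS, mthread]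
  | append_singleton L x ih =>
    unfold funcPairLoop
    have hlen : ((L ++ [x]).length : Int) = (L.length : Int) + 1 := by simp
    rw [hlen, PySem.List.pyRange_one_succ_right (by positivity), List.foldl_append]
    have hfirst :
        (PySem.List.pyRange 0 (L.length : Int) 1).foldl
          (fun st i => (PySem.List.pyRange 0 i 1).foldl (fun st j =>
            let pi := PySem.List.pyGetD (L ++ [x]) i (0, 0)
            let pj := PySem.List.pyGetD (L ++ [x]) j (0, 0)
            if pi.1 < pj.1 then (st.1 + 1, max st.2 (pi.2 - pj.2)) else st) st) st
        = funcPairLoop L st := by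
      unfold funcPairLoop
      apply PySem.List.foldl_congr_mem
      intro acc i hi
      obtain ⟨hi0, hi1⟩ := (PySem.List.mem_pyRange_one).1 hi
      apply PySem.List.foldl_congr_mem
      intro acc2 j hj
      obtain ⟨hj0, hj1⟩ := (PySem.List.mem_pyRange_one).1 hj
      simp only [pyGetD_append_left L x i (0, 0) hi0 hi1,
        pyGetD_append_left L x j (0, 0) hj0 (by omega)]
    rw [hfirst, ih]
    simp only [List.foldl_cons, List.foldl_nil]
    rw [innerIdx, cntS_snoc, bestS_snoc, mthread_ocmb]
    simp [Prod.ext_iff, add_assoc]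


-- ---- split / cross lemmas ----
theorem cntS_append (a b : List (Int × Int)) :
    cntS (a ++ b) = cntS a + cntS b + crossC a b := by
  induction a with
  | nil => simp [cntS, crossC]
  | cons x a ih =>
    simp only [List.cons_append, cntS, crossC, List.map_cons, List.sum_cons,
      List.countP_append, ih]
    push_cast
    ring

theorem bwS_append (x : Int × Int) (a b : List (Int × Int)) :
    bwS x (a ++ b) = ocmb (bwS x a) (bwS x b) := by
  induction a with
  | nil => simp [bwS, ocmb_none_left]
  | cons y a ih => simp only [List.cons_append, bwS, ih, ocmb_assoc]

theorem bestS_append (a b : List (Int × Int)) :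
    bestS (a ++ b) = ocmb (bestS a) (ocmb (crossB a b) (bestS b)) := by
  induction a with
  | nil => simp [bestS, crossB, ocmb_none_left]
  | cons x a ih =>
    simp only [List.cons_append, bestS, crossB, ih, bwS_append]
    simp only [ocmb_assoc, ocmb_left_comm, ocmb_comm]

-- ---- permutation invariance ----
theorem crossC_perm_left {a a' : List (Int × Int)} (h : a.Perm a') (b : List (Int × Int)) :
    crossC a b = crossC a' b :=
  (h.map _).sum_eq

theorem crossC_perm_right (a : List (Int × Int)) {b b' : List (Int × Int)} (h : b.Perm b') :
    crossC a b = crossC a b' := by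
  simp [crossC, h.countP_eq]

theorem bwS_perm (x : Int × Int) {b b' : List (Int × Int)} (h : b.Perm b') :
    bwS x b = bwS x b' := by
  induction h with
  | nil => rfl
  | cons y h ih => simp only [bwS, ih]
  | swap y z l => simp only [bwS]; rw [ocmb_left_comm]
  | trans h1 h2 ih1 ih2 => exact ih1.trans ih2

theorem crossB_perm_right (a : List (Int × Int)) {b b' : List (Int × Int)} (h : b.Perm b') :
    crossB a b = crossB a b' := by
  induction a with
  | nil => rfl
  | cons x a ih => simp only [crossB, bwS_perm x h, ih]

theorem crossB_perm_left {a a' : List (Int × Int)} (h : a.Perm a') (b : List (Int × Int)) :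
    crossB a b = crossB a' b := by
  induction h with
  | nil => rfl
  | cons y h ih => simp only [crossB, ih]
  | swap y z l => simp only [crossB]; rw [ocmb_left_comm]
  | trans h1 h2 ih1 ih2 => exact ih1.trans ih2


-- ---- annotate lemmas ----
def minI (l : List (Int × Int)) (a : Int) : Int := l.foldl (fun m q => min m q.2) a

theorem minI_hoist (l : List (Int × Int)) (a b : Int) :
    min a (minI l b) = minI l (min a b) := by
  induction l generalizing b with
  | nil => rfl
  | cons q l ih => simp only [minI, List.foldl_cons] at *; rw [ih, min_assoc]

theorem altAnnotate_cons (p : Int × Int) (rest : List (Int × Int)) :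
    altAnnotate (p :: rest) =
      (p.1, p.2,
        match altAnnotate rest with
        | [] => p.2
        | q :: _ => min p.2 q.2.2) :: altAnnotate rest := by
  unfold altAnnotate
  rw [List.reverse_cons, List.foldl_append]
  simp

theorem altAnnotate_struct : ∀ (l : List (Int × Int)) (p : Int × Int),
    altAnnotate (p :: l) = (p.1, p.2, minI l p.2) :: altAnnotate l := by
  intro l
  induction l with
  | nil => intro p; rw [altAnnotate_cons]; rfl
  | cons q l ih =>
    intro p
    rw [altAnnotate_cons, ih q]
    have hmin := minI_hoist l p.2 q.2
    simp only [minI] at hmin ⊢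
    simp [hmin]

theorem altAnnotate_map (l : List (Int × Int)) :
    (altAnnotate l).map (fun t => (t.1, t.2.1)) = l := by
  induction l with
  | nil => rfl
  | cons p l ih => rw [altAnnotate_struct]; simp [ih]

theorem altAnnotate_length (l : List (Int × Int)) : (altAnnotate l).length = l.length := by
  have := congrArg List.length (altAnnotate_map l)
  simpa using this

-- ---- one-step cross lemmas used by the merge invariant ----
theorem bwS_none (x : Int × Int) (B : List (Int × Int)) (h : ∀ y ∈ B, ¬(y.1 < x.1)) :
    bwS x B = none := by
  induction B with
  | nil => rfl
  | cons y B ih =>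
    simp only [bwS, if_neg (h y List.mem_cons_self), ocmb_none_left]
    exact ih (fun z hz => h z (List.mem_cons_of_mem _ hz))

theorem crossC_skip (x : Int × Int) (a B : List (Int × Int)) (h : ∀ y ∈ B, ¬(y.1 < x.1)) :
    crossC (x :: a) B = crossC a B := by
  simp only [crossC, List.map_cons, List.sum_cons]
  rw [List.countP_eq_zero.2 (by intro y hy; simpa using h y hy)]
  simp

theorem crossB_skip (x : Int × Int) (a B : List (Int × Int)) (h : ∀ y ∈ B, ¬(y.1 < x.1)) :
    crossB (x :: a) B = crossB a B := by
  simp only [crossB, bwS_none x B h, ocmb_none_left]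

theorem crossC_take (y : Int × Int) (a b : List (Int × Int)) (h : ∀ x ∈ a, y.1 < x.1) :
    crossC a (y :: b) = (a.length : Int) + crossC a b := by
  induction a with
  | nil => simp [crossC]
  | cons x a ih =>
    simp only [crossC, List.map_cons, List.sum_cons, List.countP_cons] at *
    rw [if_pos (by simpa using h x List.mem_cons_self)]
    have := ih (fun z hz => h z (List.mem_cons_of_mem _ hz))
    push_cast [List.length_cons] at *
    omega

theorem crossB_take (y : Int × Int) (z : Int × Int) (a b : List (Int × Int))
    (h : ∀ x ∈ (z :: a), y.1 < x.1) :
    crossB (z :: a) (y :: b) = ocmb (some (y.2 - minI a z.2)) (crossB (z :: a) b) := by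
  induction a generalizing z with
  | nil =>
    simp only [crossB, bwS, minI, List.foldl_nil,
      if_pos (by simpa using h z List.mem_cons_self), ocmb_none_right]
  | cons w a ih =>
    have hz : y.1 < z.1 := h z List.mem_cons_self
    have hrest : ∀ x ∈ (w :: a), y.1 < x.1 := fun x hx => h x (List.mem_cons_of_mem _ hx)
    have e1 : bwS z (y :: b) = ocmb (some (y.2 - z.2)) (bwS z b) := by
      simp only [bwS, if_pos hz]
    have key : ocmb (some (y.2 - z.2)) (some (y.2 - minI a w.2)) =
        some (y.2 - minI (w :: a) z.2) := by
      have h2 := minI_hoist a z.2 w.2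
      simp only [ocmb, minI, List.foldl_cons] at h2 ⊢
      congr 1
      omega
    calc crossB (z :: w :: a) (y :: b)
        = ocmb (ocmb (some (y.2 - z.2)) (bwS z b))
            (ocmb (some (y.2 - minI a w.2)) (crossB (w :: a) b)) := by
          rw [crossB, e1, ih w hrest]
      _ = ocmb (ocmb (some (y.2 - z.2)) (some (y.2 - minI a w.2)))
            (ocmb (bwS z b) (crossB (w :: a) b)) := by
          simp only [ocmb_assoc, ocmb_left_comm]
      _ = ocmb (some (y.2 - minI (w :: a) z.2)) (crossB (z :: w :: a) b) := by
          rw [key]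
          simp only [crossB]


-- ---- the merge invariant ----
theorem crossC_nil_right (a : List (Int × Int)) : crossC a [] = 0 := by
  induction a with
  | nil => rfl
  | cons x a ih => simp [crossC] at *; try exact ih

theorem crossB_nil_right (a : List (Int × Int)) : crossB a [] = none := by
  induction a with
  | nil => rfl
  | cons x a ih => simp [crossB, bwS, ih, ocmb_none_right]

theorem altMerge_nil_right (aa : List (Int × Int × Int)) :
    altMerge aa [] = (aa.map (fun t => (t.1, t.2.1)), 0, none) := by
  cases aa <;> simp [altMerge]

theorem ocmb_some_match (d : Int) (o : Option Int) :
    (some (match o with | none => d | some m => max d m) : Option Int) = ocmb (some d) o := by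
  cases o <;> rfl

theorem merge_spec : ∀ (n : Nat) (sa sb : List (Int × Int)), sa.length + sb.length ≤ n →
    sortedLE sa → sortedLE sb →
    ((altMerge (altAnnotate sa) sb).1.Perm (sa ++ sb) ∧
      sortedLE (altMerge (altAnnotate sa) sb).1) ∧
    (altMerge (altAnnotate sa) sb).2.1 = crossC sa sb ∧
    (altMerge (altAnnotate sa) sb).2.2 = crossB sa sb := by
  intro n
  induction n with
  | zero =>
    intro sa sb hle ha hb
    have h1 : sa = [] := by cases sa <;> simp_all
    have h2 : sb = [] := by cases sb <;> simp_all
    subst h1; subst h2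
    simp [altAnnotate, altMerge, crossC, crossB, sortedLE]
  | succ n ih =>
    intro sa sb hle ha hb
    match sa, sb with
    | [], sb =>
      refine ⟨⟨?_, ?_⟩, ?_, ?_⟩ <;> simp [altAnnotate, altMerge, crossC, crossB]
      exact hb
    | z :: sa', [] =>
      rw [altMerge_nil_right, altAnnotate_map]
      exact ⟨⟨by simp, ha⟩, by simp [crossC_nil_right], by simp [crossB_nil_right]⟩
    | z :: sa', y :: sb' =>
      have hann := altAnnotate_struct sa' z
      obtain ⟨hzall, ha'⟩ := List.pairwise_cons.mp ha
      obtain ⟨hyall, hb'⟩ := List.pairwise_cons.mp hb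
      by_cases hlt : y.1 < z.1
      · -- take from the right half: y is inverted with all of z :: sa'
        have hinv : ∀ x ∈ (z :: sa'), y.1 < x.1 := by
          intro x hx
          rcases List.mem_cons.mp hx with h | h
          · subst h; exact hlt
          · exact lt_of_lt_of_le hlt (hzall x h)
        have hstep : altMerge (altAnnotate (z :: sa')) (y :: sb') =
            (y :: (altMerge (altAnnotate (z :: sa')) sb').1,
             (altMerge (altAnnotate (z :: sa')) sb').2.1 + (1 + ((altAnnotate sa').length : Int)),
             some (match (altMerge (altAnnotate (z :: sa')) sb').2.2 with
               | none => y.2 - minI sa' z.2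
               | some m => max (y.2 - minI sa' z.2) m)) := by
          conv_lhs => rw [hann]
          rw [show altMerge ((z.1, z.2, minI sa' z.2) :: altAnnotate sa') (y :: sb') =
            (let r := altMerge ((z.1, z.2, minI sa' z.2) :: altAnnotate sa') sb'
             (y :: r.1, r.2.1 + (1 + ((altAnnotate sa').length : Int)),
              some (match r.2.2 with
                | none => y.2 - (z.1, z.2, minI sa' z.2).2.2
                | some m => max (y.2 - (z.1, z.2, minI sa' z.2).2.2) m)))
            from by rw [altMerge]; simp [hlt]]
          rw [← hann]
        obtain ⟨⟨hperm, hsort⟩, hc, hm⟩ :=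
          ih (z :: sa') sb' (by simp at hle ⊢; omega) ha hb'
        rw [hstep]
        refine ⟨⟨?_, ?_⟩, ?_, ?_⟩
        · exact ((hperm.cons y).trans (List.perm_middle).symm)
        · refine List.pairwise_cons.mpr ⟨?_, hsort⟩
          intro w hw
          rcases (List.mem_append.mp (hperm.mem_iff.mp hw)) with h | h
          · exact le_of_lt (hinv w h)
          · exact hyall w h
        · rw [hc, altAnnotate_length, crossC_take y (z :: sa') sb' hinv]
          simp
          omega
        · rw [ocmb_some_match, hm, crossB_take y z sa' sb' hinv]
      · -- take from the left half: z is inverted with nothing in y :: sb'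
        have hnone : ∀ y' ∈ (y :: sb'), ¬(y'.1 < z.1) := by
          intro y' hy'
          rcases List.mem_cons.mp hy' with h | h
          · subst h; exact hlt
          · exact fun hcon => hlt (lt_of_le_of_lt (hyall y' h) hcon)
        have hstep : altMerge (altAnnotate (z :: sa')) (y :: sb') =
            (z :: (altMerge (altAnnotate sa') (y :: sb')).1,
             (altMerge (altAnnotate sa') (y :: sb')).2.1,
             (altMerge (altAnnotate sa') (y :: sb')).2.2) := by
          conv_lhs => rw [hann]
          rw [altMerge]
          simp [hlt]
        obtain ⟨⟨hperm, hsort⟩, hc, hm⟩ :=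
          ih sa' (y :: sb') (by simp at hle ⊢; omega) ha' hb
        rw [hstep]
        refine ⟨⟨?_, ?_⟩, ?_, ?_⟩
        · exact hperm.cons z
        · refine List.pairwise_cons.mpr ⟨?_, hsort⟩
          intro w hw
          rcases (List.mem_append.mp (hperm.mem_iff.mp hw)) with h | h
          · exact hzall w h
          · rcases List.mem_cons.mp h with h' | h'
            · subst h'; omega
            · exact le_trans (by omega) (hyall w h')
        · rw [hc, crossC_skip z sa' (y :: sb') hnone]
        · rw [hm, crossB_skip z sa' (y :: sb') hnone]


-- ---- correctness of B's merge sort ----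
theorem altSort_spec : ∀ (n : Nat) (l : List (Int × Int)), l.length ≤ n →
    ((altSort l).1.Perm l ∧ sortedLE (altSort l).1) ∧
    (altSort l).2.1 = cntS l ∧ (altSort l).2.2 = bestS l := by
  intro n
  induction n with
  | zero =>
    intro l hle
    have : l = [] := by cases l <;> simp_all
    subst this
    simp [altSort, cntS, bestS, sortedLE]
  | succ n ih =>
    intro l hle
    rw [altSort]
    by_cases h1 : l.length ≤ 1
    · rw [if_pos h1]
      match l, h1 with
      | [], _ => simp [cntS, bestS, sortedLE]
      | [x], _ => simp [cntS, bestS, bwS, sortedLE, ocmb]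
    · rw [if_neg h1]
      dsimp only
      set m := l.length / 2 with hm
      obtain ⟨⟨pa, sa⟩, ca, ma⟩ := ih (l.take m) (by simp; omega)
      obtain ⟨⟨pb, sbb⟩, cb, mb⟩ := ih (l.drop m) (by simp; omega)
      obtain ⟨⟨pm, sm⟩, cm, mm⟩ :=
        merge_spec ((altSort (l.take m)).1.length + (altSort (l.drop m)).1.length)
          (altSort (l.take m)).1 (altSort (l.drop m)).1 le_rfl sa sbb
      refine ⟨⟨?_, sm⟩, ?_, ?_⟩
      · exact pm.trans ((pa.append pb).trans (by rw [List.take_append_drop]))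
      · rw [cm, ca, cb, crossC_perm_left pa, crossC_perm_right _ pb]
        conv_rhs => rw [← List.take_append_drop m l]
        rw [cntS_append]
      · rw [mm, ma, mb, crossB_perm_left pa, crossB_perm_right _ pb]
        conv_rhs => rw [← List.take_append_drop m l]
        rw [bestS_append]
        simp only [ocmb_assoc, ocmb_left_comm, ocmb_comm]

-- ---- positivity of best distances when indices strictly increase ----
theorem ocmb_pos (o1 o2 : Option Int) (h1 : ∀ b, o1 = some b → 0 < b)
    (h2 : ∀ b, o2 = some b → 0 < b) : ∀ b, ocmb o1 o2 = some b → 0 < b := by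
  intro b hb
  cases o1 with
  | none => exact h2 b (by simpa [ocmb] using hb)
  | some v1 =>
    cases o2 with
    | none => exact h1 b (by simpa [ocmb_none_right] using hb)
    | some v2 =>
      have hv1 := h1 v1 rfl
      have hv2 := h2 v2 rfl
      simp [ocmb] at hb
      rcases max_choice v1 v2 with h | h <;> omega

theorem bwS_pos (x : Int × Int) (l : List (Int × Int)) (h : ∀ y ∈ l, x.2 < y.2) :
    ∀ b, bwS x l = some b → 0 < b := by
  induction l with
  | nil => intro b hb; simp [bwS] at hb
  | cons y l ih =>
    have hy := h y List.mem_cons_self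
    have ih' := ih (fun z hz => h z (List.mem_cons_of_mem _ hz))
    refine ocmb_pos _ _ ?_ ih'
    intro b hb
    by_cases hc : y.1 < x.1
    · rw [if_pos hc] at hb
      have : y.2 - x.2 = b := by simpa using hb
      omega
    · rw [if_neg hc] at hb
      simp at hb
theorem bestS_pos (l : List (Int × Int)) (h : l.Pairwise (fun p q => p.2 < q.2)) :
    ∀ b, bestS l = some b → 0 < b := by
  induction l with
  | nil => intro b hb; simp [bestS] at hb
  | cons x l ih =>
    obtain ⟨hx, h'⟩ := List.pairwise_cons.mp h
    exact ocmb_pos _ _ (bwS_pos x l hx) (ih h')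

-- ===== VERDICT (by name: the statement is the Claim_ definition above) =====
theorem func_spec : Claim_equal_func := by
  intro nums colors _ hpre
  unfold Pre_func at hpre
  unfold Spec_func func func_alt
  rw [funcBuild_eq nums colors hpre, altBuild_eq]
  dsimp only
  obtain ⟨_, cR, mR⟩ := altSort_spec _ _
    (le_refl (((PySem.List.enumerate (nums.zip colors) 0).filter
      (fun e => !(e.2.2 == "B"))).map projE).length)
  obtain ⟨_, cB, mB⟩ := altSort_spec _ _
    (le_refl (((PySem.List.enumerate (nums.zip colors) 0).filter
      (fun e => e.2.2 == "B")).map projE).length)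
  rw [pairLoop_spec, pairLoop_spec, cR, mR, cB, mB]
  dsimp only
  rw [← mthread_ocmb]
  have hposR := bestS_pos _ (build_pairwise nums colors (fun e => !(e.2.2 == "B")))
  have hposB := bestS_pos _ (build_pairwise nums colors (fun e => e.2.2 == "B"))
  cases hc : ocmb
      (bestS (((PySem.List.enumerate (nums.zip colors) 0).filter
        (fun e => !(e.2.2 == "B"))).map projE))
      (bestS (((PySem.List.enumerate (nums.zip colors) 0).filter
        (fun e => e.2.2 == "B")).map projE)) with
  | none => simp [mthread]
  | some v =>
    have hv : 0 < v := ocmb_pos _ _ hposR hposB v hc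
    simp only [mthread]
    rw [max_eq_right (by omega)]
    ring
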